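-- pv_equiv track=rewrite | github.com/jyzayu/TIL | PS/cos/3-2.py | solution
-- ===== SOURCE A (Python) =====
-- def func_a(arr, s):
--     return s in arr
--
-- def func_b(s):
--     length = len(s)
--     for i in range(length // 2):
--         if s[i] != s[length - i - 1]:
--             return False
--     return True
--
-- def func_c(palindromes, k):
--     palindromes = sorted(palindromes)
--     if len(palindromes) < k:
--         return "NULL"
--     else:
--         return palindromes[k - 1]
--
-- def solution(s, k):
--     palindromes = []
--     length = len(s)
--     #이 길이를 어떻게 설정할지 생각하지 못했는데
--
--     #startIdx에서 길이가 1인 문자열 부터 문자열 끝까지?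
--     # for문에서 length -start_idx + 1? 이면 값 넣으면
--     # [:length] s[length-1]까지 가니까 idxError X
--
--     #아 반복문도 끝-1까지 들어가고
--     #:도 -1까지 들어가는거 해깔리네 ; 전에 문제풀 때도 이런거
--     #여러개 같이 쓰이면 해깔리던데 ㅜㅠ
--     #배열에는 0번쨰부터 쓰지만 문제에선 0번쨰를 1번쨰로 쓰고
--     #1번쨰 값을 가지고 2번쨰 예측값을 구한다 이런식
--     for start_idx in range(length):
--         for cnt in range(1, length - start_idx + 1):
--             sub_s = s[start_idx : start_idx + cnt]
--             if func_b(sub_s) == True: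
--                 if func_a(palindromes, sub_s) == False:
--                     palindromes.append(sub_s)
--
--     answer = func_c(palindromes, k)
--     return answer
-- ===== SOURCE B (Python) =====
-- def solution(s, k):
--     n = len(s)
--     pals = set()
--     for c in range(2 * n - 1):
--         l = c // 2
--         r = l + c % 2
--         while l >= 0 and r < n and s[l] == s[r]:
--             pals.add(s[l:r + 1])
--             l -= 1
--             r += 1
--     ordered = sorted(pals)
--     return ordered[k - 1] if 1 <= k <= len(ordered) else "NULL"
-- ===== Notes on version B (the rewrite author's own statement) =====
-- stated objective: faster
-- what changed: B does not test substrings at all: it expands around each of the 2n-1 palindrome centers, growing outward only while the two new end characters match (so only palindromic substrings are ever produced and each center stops at its first mismatch), deduplicates them in a hash set, then sorts once and indexes with a bounds check; A enumerates every substring, runs a half-scan palindrome test on each, and deduplicates with a linear scan of the growing result list.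
-- outside the precondition, e.g. on solution('ab', 0): A returns 'b', B returns 'NULL'; on solution('', 0): A raises IndexError, B returns 'NULL'; on solution('ab', -2): A raises IndexError, B returns 'NULL'
import Mathlib
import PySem

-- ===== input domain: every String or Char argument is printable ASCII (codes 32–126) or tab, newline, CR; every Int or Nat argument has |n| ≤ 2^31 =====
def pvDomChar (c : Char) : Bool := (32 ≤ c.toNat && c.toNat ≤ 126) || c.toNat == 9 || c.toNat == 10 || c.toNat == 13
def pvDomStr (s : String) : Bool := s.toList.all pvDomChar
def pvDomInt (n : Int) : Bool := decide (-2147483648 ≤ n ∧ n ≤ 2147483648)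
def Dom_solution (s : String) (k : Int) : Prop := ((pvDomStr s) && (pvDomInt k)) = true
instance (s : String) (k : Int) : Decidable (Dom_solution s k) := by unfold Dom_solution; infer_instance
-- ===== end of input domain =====

-- B enumerates only the palindromic substrings by expanding around each of the 2n-1 centers
-- (stopping a center as soon as its endpoints mismatch), deduplicates in a hash set, sorts once and
-- indexes with a two-sided bounds check; A tests every substring and deduplicates by a linear list
-- scan (objective: faster; return-value equivalence proved on Pre_).

-- ===== PORT A =====
-- func_a(arr, s) = s in arr  (list membership)
def funcA (arr : List (List Char)) (t : List Char) : Bool := arr.contains t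

-- the index loop of func_b: early-return False on a mismatched pair
def funcBLoop (t : List Char) (length : Int) : List Int → Bool
  | [] => true
  | i :: rest =>
      if PySem.List.pyGetD t i ' ' ≠ PySem.List.pyGetD t (length - i - 1) ' ' then false
      else funcBLoop t length rest

def funcB (t : List Char) : Bool :=
  let length : Int := PySem.Chars.len t
  funcBLoop t length (PySem.List.pyRange 0 (PySem.Int.floordiv length 2) 1)

def funcC (palindromes : List (List Char)) (k : Int) : String :=
  let p := PySem.List.sorted palindromes (fun x => x) false
  if (p.length : Int) < k then "NULL"
  else String.ofList (PySem.List.pyGetD p (k - 1) [])   -- Python raises for k-1 out of range: outside Pre_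

def solution (s : String) (k : Int) : String :=
  let cs := s.toList
  let length : Int := PySem.Chars.len cs
  let palindromes : List (List Char) :=
    (PySem.List.pyRange 0 length 1).foldl (fun pals start_idx =>
      (PySem.List.pyRange 1 (length - start_idx + 1) 1).foldl (fun pals cnt =>
        let sub_s := PySem.List.slice cs (some start_idx) (some (start_idx + cnt))
        if funcB sub_s = true then
          if funcA pals sub_s = false then pals ++ [sub_s] else pals
        else pals) pals) []
  funcC palindromes k

-- ===== PORT B =====
-- the while loop `while l >= 0 and r < n and s[l] == s[r]: pals.add(s[l:r+1]); l -= 1; r += 1`,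
-- with fuel = len(s)+1: l decreases by 1 each pass and starts below len(s), so the fuel never
-- runs out before the guard fails (proved in mem_expandLoop below)
def expandLoop (cs : List Char) (n : Int) (pals : PySem.Set (List Char)) (l r : Int) :
    Nat → PySem.Set (List Char)
  | 0 => pals
  | fuel + 1 =>
      if 0 ≤ l ∧ r < n ∧ PySem.List.pyGetD cs l ' ' = PySem.List.pyGetD cs r ' ' then
        expandLoop cs n (PySem.Set.add pals (PySem.List.slice cs (some l) (some (r + 1))))
          (l - 1) (r + 1) fuel
      else pals

def solution_alt (s : String) (k : Int) : String :=
  let cs := s.toList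
  let n : Int := PySem.Chars.len cs
  let pals : PySem.Set (List Char) :=
    (PySem.List.pyRange 0 (2 * n - 1) 1).foldl (fun pals c =>
      expandLoop cs n pals (PySem.Int.floordiv c 2)
        (PySem.Int.floordiv c 2 + PySem.Int.mod c 2) (cs.length + 1)) (PySem.Set.ofList [])
  let ordered := PySem.List.sorted pals (fun x => x) false
  if 1 ≤ k ∧ k ≤ (ordered.length : Int) then String.ofList (PySem.List.pyGetD ordered (k - 1) [])
  else "NULL"

-- ===== PRECONDITION & SPEC =====
-- Pre_ excludes nonpositive k: there A either raises IndexError (empty string, or k below minus the number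
-- of distinct palindromic substrings — a bound no closed-form input condition expresses) or returns an
-- accidental negative-index wraparound element of the sorted list; B returns "NULL" on that whole region.
def Pre_solution (s : String) (k : Int) : Prop := 1 ≤ k
instance (s : String) (k : Int) : Decidable (Pre_solution s k) := by unfold Pre_solution; infer_instance
def pvWitness_solution : String × Int := ("abacaba", 3)

def Spec_solution (s : String) (k : Int) (out : String) : Prop := out = solution_alt s k
instance (s : String) (k : Int) (out : String) : Decidable (Spec_solution s k out) := by unfold Spec_solution; infer_instance

-- ===== CLAIM (what is proved, stated in full; the proofs are below) =====
def Claim_equal_solution : Prop := ∀ (s : String) (k : Int), Dom_solution s k → Pre_solution s k → Spec_solution s k (solution s k)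

-- ===== LEMMAS AND PROOFS =====

-- the common characterisation both collections are proved equal to:
-- x is a nonempty palindromic substring of cs
def IsPalSub (cs x : List Char) : Prop :=
  (∃ a b : Int, 0 ≤ a ∧ a < b ∧ b ≤ (cs.length : Int) ∧
      x = PySem.List.slice cs (some a) (some b)) ∧ x = x.reverse

-- proof-side names for A's collection step and candidate enumeration
def stepA (pals : List (List Char)) (u : List Char) : List (List Char) :=
  if funcB u = true then (if funcA pals u = false then pals ++ [u] else pals) else pals

def candsA (cs : List Char) : List (List Char) :=
  (PySem.List.pyRange 0 (cs.length : Int) 1).flatMap (fun start_idx =>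
    (PySem.List.pyRange 1 ((cs.length : Int) - start_idx + 1) 1).map (fun cnt =>
      PySem.List.slice cs (some start_idx) (some (start_idx + cnt))))

-- the half-scan of func_b over a list of indices succeeds iff every listed pair matches
theorem funcBLoop_eq_true_iff (t : List Char) (len : Int) (l : List Int) :
    funcBLoop t len l = true ↔ ∀ i ∈ l, PySem.List.pyGetD t i ' ' = PySem.List.pyGetD t (len - i - 1) ' ' := by
  induction l with
  | nil => simp [funcBLoop]
  | cons i rest ih =>
      by_cases h : PySem.List.pyGetD t i ' ' = PySem.List.pyGetD t (len - i - 1) ' ' <;>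
        simp [funcBLoop, h, ih]

-- matching pairs on the first half iff the list equals its reverse
theorem half_pairs_iff_palindrome (t : List Char) :
    (∀ j : Nat, j < t.length / 2 → t.getD j ' ' = t.getD (t.length - 1 - j) ' ') ↔ t = t.reverse := by
  constructor
  · intro H
    apply List.ext_getElem (by simp)
    intro i h1 h2
    rw [List.getElem_reverse]
    rcases Nat.lt_or_ge i (t.length / 2) with hc | hc
    · have := H i hc
      rwa [List.getD_eq_getElem t ' ' h1, List.getD_eq_getElem t ' ' (by omega)] at this
    · rcases Nat.lt_or_ge (t.length - 1 - i) (t.length / 2) with hd | hd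
      · have := H (t.length - 1 - i) hd
        rw [List.getD_eq_getElem t ' ' (by omega), List.getD_eq_getElem t ' ' (by omega)] at this
        have he : t.length - 1 - (t.length - 1 - i) = i := by omega
        simp_rw [he] at this
        exact this.symm
      · have he : t.length - 1 - i = i := by omega
        simp_rw [he]
  · intro h j hj
    have h1 : j < t.length := by omega
    have h2 : t.length - 1 - j < t.length := by omega
    rw [List.getD_eq_getElem t ' ' h1, List.getD_eq_getElem t ' ' h2]
    have hrev := List.getElem_of_eq h h1
    rw [List.getElem_reverse] at hrev
    rw [hrev]

-- func_b is the palindrome test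
theorem funcB_eq_reverse_check (t : List Char) : funcB t = (t == t.reverse) := by
  have hfd : PySem.Int.floordiv (t.length : Int) 2 = ((t.length / 2 : Nat) : Int) := by
    exact_mod_cast PySem.Int.floordiv_natCast t.length 2
  rw [Bool.eq_iff_iff, beq_iff_eq, funcB]
  simp only [PySem.Chars.len_eq, hfd]
  rw [funcBLoop_eq_true_iff, ← half_pairs_iff_palindrome]
  constructor
  · intro H j hj
    have hmem : (j : Int) ∈ PySem.List.pyRange 0 ((t.length / 2 : Nat) : Int) 1 := by
      rw [PySem.List.mem_pyRange_one]; constructor <;> [positivity; exact_mod_cast hj]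
    have := H (j : Int) hmem
    have harith : ((t.length : Int) - j - 1) = ((t.length - 1 - j : Nat) : Int) := by omega
    rw [harith, PySem.List.pyGetD_of_nonneg t ' ' (by positivity),
        PySem.List.pyGetD_of_nonneg t ' ' (by positivity)] at this
    simpa using this
  · intro H i hi
    rw [PySem.List.mem_pyRange_one] at hi
    obtain ⟨hi0, hi2⟩ := hi
    have hj : i.toNat < t.length / 2 := by omega
    have := H i.toNat hj
    rw [PySem.List.pyGetD_of_nonneg t ' ' hi0, PySem.List.pyGetD_of_nonneg t ' ' (by omega)]
    have harith : ((t.length : Int) - i - 1).toNat = t.length - 1 - i.toNat := by omega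
    rwa [harith]

-- membership and nodup of A's dedup fold
theorem mem_dedupFold (L : List (List Char)) (acc : List (List Char)) (x : List Char) :
    x ∈ L.foldl stepA acc ↔ x ∈ acc ∨ (x ∈ L ∧ funcB x = true) := by
  induction L generalizing acc with
  | nil => simp
  | cons u rest ih =>
      simp only [List.foldl_cons, ih, List.mem_cons, stepA]
      by_cases hb : funcB u = true
      · by_cases ha : funcA acc u = false
        · simp only [hb, ha, if_pos]
          constructor
          · rintro (h | h)
            · rcases List.mem_append.mp h with h | h
              · exact Or.inl h
              · simp at h; subst h; exact Or.inr ⟨Or.inl rfl, hb⟩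
            · exact Or.inr ⟨Or.inr h.1, h.2⟩
          · rintro (h | ⟨h | h, hfb⟩)
            · exact Or.inl (List.mem_append.mpr (Or.inl h))
            · subst h; exact Or.inl (List.mem_append.mpr (Or.inr (by simp)))
            · exact Or.inr ⟨h, hfb⟩
        · have ha' : u ∈ acc := by
            simpa [funcA, List.contains_iff_mem] using ha
          simp only [hb, ha, if_true]
          constructor
          · rintro (h | h)
            · exact Or.inl h
            · exact Or.inr ⟨Or.inr h.1, h.2⟩
          · rintro (h | ⟨h | h, hfb⟩)
            · exact Or.inl h
            · subst h; exact Or.inl ha'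
            · exact Or.inr ⟨h, hfb⟩
      · simp only [hb]
        constructor
        · rintro (h | h)
          · exact Or.inl h
          · exact Or.inr ⟨Or.inr h.1, h.2⟩
        · rintro (h | ⟨h | h, hfb⟩)
          · exact Or.inl h
          · subst h; exact absurd hfb hb
          · exact Or.inr ⟨h, hfb⟩

theorem nodup_dedupFold (L : List (List Char)) (acc : List (List Char)) (h : acc.Nodup) :
    (L.foldl stepA acc).Nodup := by
  induction L generalizing acc with
  | nil => simpa
  | cons u rest ih =>
      simp only [List.foldl_cons]
      apply ih
      unfold stepA
      by_cases hb : funcB u = true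
      · by_cases ha : funcA acc u = false
        · have hu : u ∉ acc := by simpa [funcA, List.contains_iff_mem] using ha
          simp only [hb, ha, if_pos]
          refine List.Nodup.append h (List.nodup_singleton u) ?_
          intro a haacc hau
          simp at hau; subst hau
          exact hu haacc
        · simpa [hb, ha] using h
      · simpa [hb] using h

-- a nested fold over two index ranges is the flat fold over the flattened candidate list
theorem foldl_nested {α : Type} (outer : List Int) (g : Int → List (List Char)) (f : α → List Char → α) (init : α) :
    outer.foldl (fun acc a => (g a).foldl f acc) init = (outer.flatMap g).foldl f init := by
  induction outer generalizing init with
  | nil => rfl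
  | cons a rest ih => simp [List.flatMap_cons, List.foldl_append, ih]

-- A's double loop is the flat dedup fold over candsA
theorem A_fold_eq (cs : List Char) :
    (PySem.List.pyRange 0 ((cs.length : Int)) 1).foldl (fun pals start_idx =>
      (PySem.List.pyRange 1 ((cs.length : Int) - start_idx + 1) 1).foldl (fun pals cnt =>
        let sub_s := PySem.List.slice cs (some start_idx) (some (start_idx + cnt))
        if funcB sub_s = true then
          if funcA pals sub_s = false then pals ++ [sub_s] else pals
        else pals) pals) [] = (candsA cs).foldl stepA [] := by
  rw [candsA, ← foldl_nested]
  congr 1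
  funext pals start_idx
  rw [List.foldl_map]
  rfl

-- A's collection holds exactly the nonempty palindromic substrings
theorem memA_iff (cs : List Char) (x : List Char) :
    x ∈ (candsA cs).foldl stepA [] ↔ IsPalSub cs x := by
  rw [mem_dedupFold]
  simp only [List.not_mem_nil, false_or, IsPalSub, funcB_eq_reverse_check, beq_iff_eq]
  constructor
  · rintro ⟨hc, hp⟩
    refine ⟨?_, hp⟩
    simp only [candsA, List.mem_flatMap, List.mem_map, PySem.List.mem_pyRange_one] at hc
    obtain ⟨i, ⟨hi0, hin⟩, cnt, ⟨hc1, hc2⟩, rfl⟩ := hc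
    exact ⟨i, i + cnt, hi0, by omega, by omega, rfl⟩
  · rintro ⟨⟨a, b, ha, hab, hb, rfl⟩, hp⟩
    refine ⟨?_, hp⟩
    simp only [candsA, List.mem_flatMap, List.mem_map, PySem.List.mem_pyRange_one]
    exact ⟨a, ⟨ha, by omega⟩, b - a, ⟨by omega, by omega⟩, by rw [show a + (b - a) = b by ring]⟩

-- ===== B-side lemmas =====

-- getD of an in-range slice element
theorem slice_getD (cs : List Char) (a b : Int) (ha : 0 ≤ a) (hb : b ≤ (cs.length : Int))
    (j : Nat) (hj : (j : Int) < b - a) :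
    (PySem.List.slice cs (some a) (some b)).getD j ' ' = cs.getD (a.toNat + j) ' ' := by
  rw [PySem.List.slice_toNat cs ha (by omega)]
  have hj1 : j < b.toNat - a.toNat := by omega
  have hj2 : a.toNat + j < cs.length := by omega
  rw [List.getD_eq_getElem _ ' ' (by simp; omega), List.getD_eq_getElem _ ' ' hj2]
  rw [List.getElem_take, List.getElem_drop]

-- length of an in-range slice
theorem slice_length (cs : List Char) (a b : Int) (ha : 0 ≤ a) (hab : a ≤ b) (hb : b ≤ (cs.length : Int)) :
    ((PySem.List.slice cs (some a) (some b)).length : Int) = b - a := by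
  rw [PySem.List.slice_toNat cs ha (by omega)]
  simp
  omega

-- a list is a palindrome iff all opposite pairs match
theorem full_pairs_iff_palindrome (t : List Char) :
    (∀ j : Nat, j < t.length → t.getD j ' ' = t.getD (t.length - 1 - j) ' ') ↔ t = t.reverse := by
  rw [← half_pairs_iff_palindrome]
  constructor
  · intro H j hj
    exact H j (by omega)
  · intro H j hj
    rcases Nat.lt_or_ge j (t.length / 2) with hc | hc
    · exact H j hc
    · rcases Nat.lt_or_ge (t.length - 1 - j) (t.length / 2) with hd | hd
      · have := H (t.length - 1 - j) hd
        rw [show t.length - 1 - (t.length - 1 - j) = j by omega] at this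
        exact this.symm
      · rw [show t.length - 1 - j = j by omega]

-- the center pair condition is palindromicity of the expanded slice
theorem pairs_iff_pal (cs : List Char) (l r d : Int) (hlr : l = r ∨ r = l + 1) (hd : 0 ≤ d)
    (h0 : 0 ≤ l - d) (hr : r + d < (cs.length : Int)) :
    (∀ e : Int, 0 ≤ e → e ≤ d →
        PySem.List.pyGetD cs (l - e) ' ' = PySem.List.pyGetD cs (r + e) ' ')
    ↔ PySem.List.slice cs (some (l - d)) (some (r + d + 1))
        = (PySem.List.slice cs (some (l - d)) (some (r + d + 1))).reverse := by
  have hl_le_r : l ≤ r := by omega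
  -- C' : the pair condition over all positions of the slice
  have step1 : (∀ e : Int, 0 ≤ e → e ≤ d →
        PySem.List.pyGetD cs (l - e) ' ' = PySem.List.pyGetD cs (r + e) ' ')
      ↔ (∀ p : Int, l - d ≤ p → p ≤ r + d →
        PySem.List.pyGetD cs p ' ' = PySem.List.pyGetD cs (l + r - p) ' ') := by
    constructor
    · intro H p hp1 hp2
      by_cases hpl : p ≤ l
      · have := H (l - p) (by omega) (by omega)
        rw [show l - (l - p) = p by ring, show r + (l - p) = l + r - p by ring] at this
        exact this
      · have := H (p - r) (by omega) (by omega)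
        rw [show l - (p - r) = l + r - p by ring, show r + (p - r) = p by ring] at this
        exact this.symm
    · intro H e he1 he2
      have := H (l - e) (by omega) (by omega)
      rwa [show l + r - (l - e) = r + e by ring] at this
  rw [step1, ← full_pairs_iff_palindrome]
  have hlenNat : (PySem.List.slice cs (some (l - d)) (some (r + d + 1))).length
      = (r + d + 1 - (l - d)).toNat := by
    have := slice_length cs (l - d) (r + d + 1) (by omega) (by omega) (by omega)
    omega
  rw [hlenNat]
  constructor
  · intro H j hj
    rw [slice_getD cs _ _ (by omega) (by omega) j (by omega),
        slice_getD cs _ _ (by omega) (by omega) _ (by omega)]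
    have := H ((l - d) + j) (by omega) (by omega)
    rw [PySem.List.pyGetD_of_nonneg cs ' ' (by omega),
        PySem.List.pyGetD_of_nonneg cs ' ' (by omega)] at this
    have e1 : ((l - d) + (j : Int)).toNat = (l - d).toNat + j := by omega
    have e2 : (l + r - ((l - d) + (j : Int))).toNat
        = (l - d).toNat + ((r + d + 1 - (l - d)).toNat - 1 - j) := by omega
    rw [e1, e2] at this
    exact this
  · intro H p hp1 hp2
    have hjlt : (p - (l - d)).toNat < (r + d + 1 - (l - d)).toNat := by omega
    have := H (p - (l - d)).toNat hjlt
    rw [slice_getD cs _ _ (by omega) (by omega) _ (by omega),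
        slice_getD cs _ _ (by omega) (by omega) _ (by omega)] at this
    rw [PySem.List.pyGetD_of_nonneg cs ' ' (by omega),
        PySem.List.pyGetD_of_nonneg cs ' ' (by omega)]
    have e1 : p.toNat = (l - d).toNat + (p - (l - d)).toNat := by omega
    have e2 : (l + r - p).toNat
        = (l - d).toNat + ((r + d + 1 - (l - d)).toNat - 1 - (p - (l - d)).toNat) := by omega
    rw [e1, e2]
    exact this

-- what the expand loop collects: all palindromic expansions of its center, given enough fuel
theorem mem_expandLoop (cs : List Char) (pals : PySem.Set (List Char)) (l r : Int) (fuel : Nat)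
    (hfuel : l < (fuel : Int)) (x : List Char) :
    x ∈ expandLoop cs (cs.length : Int) pals l r fuel ↔ x ∈ pals ∨
      ∃ d : Int, 0 ≤ d ∧ 0 ≤ l - d ∧ r + d < (cs.length : Int) ∧
        (∀ e : Int, 0 ≤ e → e ≤ d →
          PySem.List.pyGetD cs (l - e) ' ' = PySem.List.pyGetD cs (r + e) ' ') ∧
        x = PySem.List.slice cs (some (l - d)) (some (r + d + 1)) := by
  induction fuel generalizing pals l r with
  | zero =>
      simp only [expandLoop]
      constructor
      · exact Or.inl
      · rintro (h | ⟨d, hd, h0, _, _, _⟩)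
        · exact h
        · exfalso; omega
  | succ fuel ih =>
      simp only [expandLoop]
      by_cases h : 0 ≤ l ∧ r < (cs.length : Int) ∧
          PySem.List.pyGetD cs l ' ' = PySem.List.pyGetD cs r ' '
      · rw [if_pos h, ih _ _ _ (by omega), PySem.Set.mem_add]
        obtain ⟨hl0, hrn, heq⟩ := h
        constructor
        · rintro ((hx | rfl) | ⟨d', hd', h0', hr', hp', rfl⟩)
          · exact Or.inl hx
          · refine Or.inr ⟨0, le_refl 0, by omega, by omega, ?_, by norm_num⟩
            intro e he1 he2
            rw [show e = 0 by omega]; simpa using heq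
          · refine Or.inr ⟨d' + 1, by omega, by omega, by omega, ?_, ?_⟩
            · intro e he1 he2
              rcases eq_or_lt_of_le he1 with he0 | he0
              · rw [← he0]; simpa using heq
              · have := hp' (e - 1) (by omega) (by omega)
                rwa [show l - 1 - (e - 1) = l - e by ring, show r + 1 + (e - 1) = r + e by ring] at this
            · rw [show l - (d' + 1) = l - 1 - d' by ring, show r + (d' + 1) + 1 = r + 1 + d' + 1 by ring]
        · rintro (hx | ⟨d, hd0, hld, hrd, hp, rfl⟩)
          · exact Or.inl (Or.inl hx)
          · rcases eq_or_lt_of_le hd0 with hd0' | hd0'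
            · refine Or.inl (Or.inr ?_)
              rw [← hd0']; norm_num
            · refine Or.inr ⟨d - 1, by omega, by omega, by omega, ?_, ?_⟩
              · intro e he1 he2
                have := hp (e + 1) (by omega) (by omega)
                rwa [show l - (e + 1) = l - 1 - e by ring, show r + (e + 1) = r + 1 + e by ring] at this
              · rw [show l - 1 - (d - 1) = l - d by ring, show r + 1 + (d - 1) + 1 = r + d + 1 by ring]
      · rw [if_neg h]
        constructor
        · exact Or.inl
        · rintro (hx | ⟨d, hd0, hld, hrd, hp, rfl⟩)
          · exact hx
          · exfalso
            apply h
            refine ⟨by omega, by omega, ?_⟩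
            have := hp 0 le_rfl hd0
            simpa using this

-- the expand loop only adds elements: nodup is preserved
theorem nodup_expandLoop (cs : List Char) (n : Int) (pals : PySem.Set (List Char)) (l r : Int)
    (fuel : Nat) (h : pals.Nodup) : (expandLoop cs n pals l r fuel).Nodup := by
  induction fuel generalizing pals l r with
  | zero => simpa [expandLoop]
  | succ fuel ih =>
      simp only [expandLoop]
      split_ifs with hc
      · exact ih _ _ _ (PySem.Set.nodup_add pals _ h)
      · exact h

-- a fold whose steps each add a characterised batch collects the union of the batches
theorem foldl_mem_union (f : PySem.Set (List Char) → Int → PySem.Set (List Char))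
    (Q : Int → List Char → Prop) :
    ∀ (L : List Int), (∀ st c x, c ∈ L → (x ∈ f st c ↔ x ∈ st ∨ Q c x)) →
      ∀ (init : PySem.Set (List Char)) (x : List Char),
        (x ∈ L.foldl f init ↔ x ∈ init ∨ ∃ c ∈ L, Q c x) := by
  intro L
  induction L with
  | nil => intro _ init x; simp
  | cons c rest ih =>
      intro hf init x
      simp only [List.foldl_cons]
      rw [ih (fun st c' x' hc' => hf st c' x' (List.mem_cons_of_mem c hc')) _ x,
          hf init c x (List.mem_cons_self)]
      simp only [List.mem_cons]
      constructor
      · rintro ((h | h) | ⟨c', hc', hq⟩)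
        · exact Or.inl h
        · exact Or.inr ⟨c, Or.inl rfl, h⟩
        · exact Or.inr ⟨c', Or.inr hc', hq⟩
      · rintro (h | ⟨c', rfl | hc', hq⟩)
        · exact Or.inl (Or.inl h)
        · exact Or.inl (Or.inr hq)
        · exact Or.inr ⟨c', hc', hq⟩

-- B's center fold collects exactly the nonempty palindromic substrings
theorem memB_iff (cs : List Char) (x : List Char) :
    x ∈ (PySem.List.pyRange 0 (2 * (cs.length : Int) - 1) 1).foldl (fun pals c =>
      expandLoop cs (cs.length : Int) pals (PySem.Int.floordiv c 2)
        (PySem.Int.floordiv c 2 + PySem.Int.mod c 2) (cs.length + 1)) (PySem.Set.ofList [])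
    ↔ IsPalSub cs x := by
  rw [foldl_mem_union _ (fun c x => ∃ d : Int, 0 ≤ d ∧ 0 ≤ PySem.Int.floordiv c 2 - d ∧
        (PySem.Int.floordiv c 2 + PySem.Int.mod c 2) + d < (cs.length : Int) ∧
        (∀ e : Int, 0 ≤ e → e ≤ d →
          PySem.List.pyGetD cs (PySem.Int.floordiv c 2 - e) ' '
            = PySem.List.pyGetD cs ((PySem.Int.floordiv c 2 + PySem.Int.mod c 2) + e) ' ') ∧
        x = PySem.List.slice cs (some (PySem.Int.floordiv c 2 - d))
              (some ((PySem.Int.floordiv c 2 + PySem.Int.mod c 2) + d + 1)))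
        _ (by
          intro st c x' hc
          rw [PySem.List.mem_pyRange_one] at hc
          have hlt : PySem.Int.floordiv c 2 < ((cs.length + 1 : Nat) : Int) := by
            rw [PySem.Int.floordiv_eq_ediv_of_pos (by omega)]; omega
          exact mem_expandLoop cs st _ _ _ hlt x')]
  simp only [PySem.Set.mem_ofList, List.not_mem_nil, false_or, PySem.List.mem_pyRange_one]
  constructor
  · rintro ⟨c, ⟨hc0, hc2⟩, d, hd0, hld, hrd, hp, rfl⟩
    set l := PySem.Int.floordiv c 2 with hl
    set r := l + PySem.Int.mod c 2 with hrr
    have hdiv : l = c / 2 := by rw [hl, PySem.Int.floordiv_eq_ediv_of_pos (by omega)]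
    have hmod : PySem.Int.mod c 2 = c % 2 := by rw [PySem.Int.mod_eq_emod_of_pos (by omega)]
    have hlr : l = r ∨ r = l + 1 := by rw [hrr, hdiv, hmod]; omega
    exact ⟨⟨l - d, r + d + 1, by omega, by omega, by omega, rfl⟩,
      (pairs_iff_pal cs l r d hlr hd0 hld hrd).mp hp⟩
  · rintro ⟨⟨a, b, ha, hab, hb, rfl⟩, hp⟩
    refine ⟨a + b - 1, ⟨by omega, by omega⟩, ?_⟩
    set c := a + b - 1 with hc
    set l := PySem.Int.floordiv c 2 with hl
    set r := l + PySem.Int.mod c 2 with hrr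
    have hdiv : l = c / 2 := by rw [hl, PySem.Int.floordiv_eq_ediv_of_pos (by omega)]
    have hmod : PySem.Int.mod c 2 = c % 2 := by rw [PySem.Int.mod_eq_emod_of_pos (by omega)]
    have hlr : l = r ∨ r = l + 1 := by rw [hrr, hdiv, hmod]; omega
    have hsum : l + r = c := by rw [hrr, hdiv, hmod]; omega
    have hal : a ≤ l := by rw [hdiv]; omega
    refine ⟨l - a, by omega, by omega, by omega, ?_, ?_⟩
    · have := (pairs_iff_pal cs l r (l - a) hlr (by omega) (by omega) (by omega)).mpr
      rw [show l - (l - a) = a by ring, show r + (l - a) + 1 = b by omega] at this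
      exact this hp
    · rw [show l - (l - a) = a by ring, show r + (l - a) + 1 = b by omega]

-- B's fold has no duplicates
theorem nodupB (cs : List Char) :
    ((PySem.List.pyRange 0 (2 * (cs.length : Int) - 1) 1).foldl (fun pals c =>
      expandLoop cs (cs.length : Int) pals (PySem.Int.floordiv c 2)
        (PySem.Int.floordiv c 2 + PySem.Int.mod c 2) (cs.length + 1))
      (PySem.Set.ofList [])).Nodup := by
  have h : ∀ (L : List Int) (st : PySem.Set (List Char)), st.Nodup →
      (L.foldl (fun pals c => expandLoop cs (cs.length : Int) pals (PySem.Int.floordiv c 2)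
        (PySem.Int.floordiv c 2 + PySem.Int.mod c 2) (cs.length + 1)) st).Nodup := by
    intro L
    induction L with
    | nil => intro st h; simpa
    | cons c rest ih => intro st h; exact ih _ (nodup_expandLoop _ _ _ _ _ _ h)
  exact h _ _ (PySem.Set.nodup_ofList [])

-- sorted distinct lists with the same members are equal (Python sorted of equal sets)
theorem sorted_eq_of_perm_nodup {a : Type} [LinearOrder a] (xs ys : List a)
    (hperm : xs.Perm ys) (hx : xs.Nodup) :
    PySem.List.sorted xs (fun x => x) false = PySem.List.sorted ys (fun x => x) false := by
  apply PySem.List.sorted_eq_of_perm_of_pairwise_lt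
  · exact (PySem.List.sorted_perm ys _ false).trans hperm.symm
  · have h1 := PySem.List.sorted_pairwise ys (fun x => x)
    have h2 : (PySem.List.sorted ys (fun x => x) false).Nodup :=
      (PySem.List.sorted_perm ys _ false).nodup_iff.mpr ((hperm.nodup_iff).mp hx)
    have h2' : (PySem.List.sorted ys (fun x => x) false).Pairwise (fun a b => a ≠ b) := h2
    exact (h1.and h2').imp (fun h => lt_of_le_of_ne h.1 h.2)

-- ===== VERDICT (by name: the statement is the Claim_ definition above) =====
theorem solution_spec : Claim_equal_solution := by
  intro s k _ hpre
  unfold Pre_solution at hpre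
  unfold Spec_solution
  have hA : solution s k = funcC ((candsA s.toList).foldl stepA []) k := by
    simp only [solution, PySem.Chars.len_eq]
    rw [A_fold_eq]
  set Bfold := (PySem.List.pyRange 0 (2 * (s.toList.length : Int) - 1) 1).foldl (fun pals c =>
      expandLoop s.toList (s.toList.length : Int) pals (PySem.Int.floordiv c 2)
        (PySem.Int.floordiv c 2 + PySem.Int.mod c 2) (s.toList.length + 1))
      (PySem.Set.ofList []) with hBfold
  have hB : solution_alt s k =
      (if 1 ≤ k ∧ k ≤ ((PySem.List.sorted Bfold (fun x => x) false).length : Int)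
       then String.ofList (PySem.List.pyGetD (PySem.List.sorted Bfold (fun x => x) false) (k - 1) [])
       else "NULL") := by
    simp only [solution_alt, PySem.Chars.len_eq, hBfold]
  have hnA : ((candsA s.toList).foldl stepA []).Nodup := nodup_dedupFold _ _ (by simp)
  have hnB : Bfold.Nodup := by rw [hBfold]; exact nodupB s.toList
  have hmem : ∀ x, x ∈ (candsA s.toList).foldl stepA [] ↔ x ∈ Bfold := by
    intro x
    rw [memA_iff, hBfold, memB_iff]
  have hperm : ((candsA s.toList).foldl stepA []).Perm Bfold :=
    (List.perm_ext_iff_of_nodup hnA hnB).mpr hmem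
  have hsorted : PySem.List.sorted ((candsA s.toList).foldl stepA []) (fun x => x) false
      = PySem.List.sorted Bfold (fun x => x) false := by
    convert sorted_eq_of_perm_nodup _ _ hperm hnA using 2
  rw [hA, hB, funcC]
  simp only [hsorted]
  split_ifs with h1 h2
  · omega
  · rfl
  · rfl
  · omega
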